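-- pv_equiv track=rewrite | github.com/maxhirsch/Exam-Conflicts | exam_scheduler.py | get_departments
-- ===== SOURCE A (Python) =====
-- def get_departments(courses):
--     """
--     Creates a dictionary of departments and courses in those departments.
--
--     Parameters:
--     -----------
--     courses (list): All courses formatted LLNNN (LL is a 2 character department code)
--
--
--     returns (dict): Departments where the keys are LL and the values are lists of
--         the courses in the departments
--     """
--
--     departments = {}
--     for course in courses:
--         prefix = course[:2]
--         # either add department prefix and course to dictionary or
--         # add course to department list in the dictionary
--         if prefix not in departments:
--             departments[prefix] = [course]
--         else:
--             departments[prefix].append(course)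
--
--     return departments
-- ===== SOURCE B (Python) =====
-- def get_departments(courses):
--     prefixes = dict.fromkeys(course[:2] for course in courses)
--     return {p: [c for c in courses if c[:2] == p] for p in prefixes}
-- ===== Notes on version B (the rewrite author's own statement) =====
-- stated objective: alternative
-- what changed: B replaces A's single accumulating dict-building pass with a two-phase decomposition: first compute the ordered set of distinct 2-char prefixes (dict.fromkeys), then build each group by filtering the course list per prefix.
import Mathlib
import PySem

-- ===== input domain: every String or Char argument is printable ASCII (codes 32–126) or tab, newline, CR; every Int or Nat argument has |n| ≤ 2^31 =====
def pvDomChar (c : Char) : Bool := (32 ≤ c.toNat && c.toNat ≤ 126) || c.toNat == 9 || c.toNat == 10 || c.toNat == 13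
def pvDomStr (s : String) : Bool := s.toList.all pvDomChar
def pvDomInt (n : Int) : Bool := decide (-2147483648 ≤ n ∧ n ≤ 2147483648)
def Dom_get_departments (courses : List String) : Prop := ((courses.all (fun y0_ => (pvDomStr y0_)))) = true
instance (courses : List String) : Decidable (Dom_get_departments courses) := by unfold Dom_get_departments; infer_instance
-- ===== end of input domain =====

-- B changes the decomposition: distinct prefixes first, then one filter scan per prefix (alternative, no speed claim).

-- ===== PORT A =====
def get_departments (courses : List String) : List (String × List String) :=
  (courses.foldl (fun departments course =>
      let pfx := PySem.Str.slice course none (some 2)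
      if !departments.contains pfx then
        departments.insert pfx [course]
      else
        departments.modify pfx [] (fun l => l ++ [course]))
    PySem.Dict.empty).items

-- ===== PORT B =====
def get_departments_alt (courses : List String) : List (String × List String) :=
  (PySem.List.dedup (courses.map (fun course => PySem.Str.slice course none (some 2)))).map
    (fun p => (p, courses.filter (fun c => PySem.Str.slice c none (some 2) == p)))

-- ===== PRECONDITION & SPEC =====
def Spec_get_departments (courses : List String) (out : List (String × List String)) : Prop := out = get_departments_alt courses
instance (courses : List String) (out : List (String × List String)) : Decidable (Spec_get_departments courses out) := by unfold Spec_get_departments; infer_instance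

-- ===== CLAIM (what is proved, stated in full; the proofs are below) =====
def Claim_equal_get_departments : Prop := ∀ (courses : List String), Dom_get_departments courses → Spec_get_departments courses (get_departments courses)

-- ===== LEMMAS AND PROOFS =====

-- A's two branches both amount to the single dict-modify step (insert on an absent key appends, like modify).
lemma stepA_eq_modify (d : PySem.Dict String (List String)) (c : String) :
    (if !d.contains (PySem.Str.slice c none (some 2)) then
        d.insert (PySem.Str.slice c none (some 2)) [c]
      else
        d.modify (PySem.Str.slice c none (some 2)) [] (fun l => l ++ [c]))
      = d.modify (PySem.Str.slice c none (some 2)) [] (fun l => l ++ [c]) := by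
  by_cases h : d.contains (PySem.Str.slice c none (some 2))
  · simp [h]
  · simp only [Bool.not_eq_true] at h
    simp [PySem.Dict.insert, PySem.Dict.modify, h, PySem.Dict.getD_of_not_contains]

-- A's fold, rephrased as the canonical grouping fold over (prefix, course) pairs.
lemma foldA_eq_pairFold (courses : List String) :
    (courses.foldl (fun departments course =>
        let pfx := PySem.Str.slice course none (some 2)
        if !departments.contains pfx then
          departments.insert pfx [course]
        else
          departments.modify pfx [] (fun l => l ++ [course]))
      PySem.Dict.empty)
    = (courses.map (fun c => (PySem.Str.slice c none (some 2), c))).foldl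
        (fun d p => d.modify p.1 [] (fun l => l ++ [p.2])) PySem.Dict.empty := by
  rw [List.foldl_map]
  exact List.foldl_ext _ _ _ (fun d c _ => stepA_eq_modify d c)

-- ===== VERDICT (by name: the statement is the Claim_ definition above) =====
theorem get_departments_spec : Claim_equal_get_departments := by
  intro courses _
  unfold Spec_get_departments get_departments get_departments_alt
  rw [foldA_eq_pairFold]
  set l := courses.map (fun c => (PySem.Str.slice c none (some 2), c)) with hl
  set D := l.foldl (fun d p => d.modify p.1 [] (fun l => l ++ [p.2])) PySem.Dict.empty with hD
  have hkeys : D.keys = PySem.List.dedup (courses.map (fun c => PySem.Str.slice c none (some 2))) := by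
    rw [hD, PySem.Dict.keys_foldl_modify_key]
    simp [hl, PySem.Set.update, PySem.List.dedup_eq_ofList, PySem.Set.ofList_eq_foldl,
      PySem.Dict.keys_empty, List.map_map, Function.comp_def]
  have hnd : D.keys.Nodup := by
    rw [hD]
    exact PySem.Dict.nodup_keys_foldl_modify_key _ _ _ _ _ PySem.Dict.nodup_keys_empty
  have hget : ∀ k, D.getD k [] = courses.filter (fun c => PySem.Str.slice c none (some 2) == k) := by
    intro k
    rw [hD, PySem.Dict.getD_foldl_modify_append]
    simp [hl, List.filter_map, List.map_map, Function.comp_def, PySem.Dict.getD_empty]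
  rw [PySem.Dict.items_eq_map_keys D hnd [], hkeys]
  exact List.map_congr_left (fun k _ => by rw [hget k])
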